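-- pv_equiv track=rewrite | github.com/Qiuscraft/DeepCloneFinder | generate_prompts.py | truncate_code
-- ===== SOURCE A (Python) =====
-- def truncate_code(code: str, max_chars: int = 2000) -> str:
--     """截断代码，避免提示词过长"""
--     if not code:
--         return ""
--     if len(code) <= max_chars:
--         return code
--     lines = code.splitlines()
--     out = []
--     chars = 0
--     for l in lines:
--         if chars + len(l) + 1 > max_chars:
--             break
--         out.append(l)
--         chars += len(l) + 1
--     out.append("/* TRUNCATED */")
--     return "\n".join(out)
-- ===== SOURCE B (Python) =====
-- def truncate_code(code: str, max_chars: int = 2000) -> str: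
--     """Prefix-sum decomposition: build cumulative line costs once, count how
--     many fit, then slice — instead of A's greedy break loop with accumulators."""
--     if not code:
--         return ""
--     if len(code) <= max_chars:
--         return code
--     lines = code.splitlines()
--     cum = []
--     total = 0
--     for l in lines:
--         total += len(l) + 1
--         cum.append(total)
--     k = sum(1 for c in cum if c <= max_chars)
--     return "\n".join(lines[:k] + ["/* TRUNCATED */"])
-- ===== Notes on version B (the rewrite author's own statement) =====
-- stated objective: alternative
-- what changed: Replaces the greedy break-loop that appends kept lines while tracking a running character count with a prefix-sum formulation: compute cumulative line costs, count how many cumulative sums fit the budget, and slice lines[:k] before joining.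
import Mathlib
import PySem

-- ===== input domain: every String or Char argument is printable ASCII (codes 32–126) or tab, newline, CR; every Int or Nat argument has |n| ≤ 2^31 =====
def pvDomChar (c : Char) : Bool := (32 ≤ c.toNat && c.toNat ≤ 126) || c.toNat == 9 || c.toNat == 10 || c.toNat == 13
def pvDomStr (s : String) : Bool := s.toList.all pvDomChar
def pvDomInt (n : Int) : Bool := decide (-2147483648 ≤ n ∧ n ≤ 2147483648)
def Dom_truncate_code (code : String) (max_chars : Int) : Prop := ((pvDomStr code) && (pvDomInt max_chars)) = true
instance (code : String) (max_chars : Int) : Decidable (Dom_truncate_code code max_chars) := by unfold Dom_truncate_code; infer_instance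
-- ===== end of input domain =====

-- B replaces A's greedy break-loop with a prefix-sum count and a slice (alternative decomposition, same cost).

-- ===== PORT A =====
-- the for-loop with break: out accumulator, running char count
def tcLoopA (maxc : Int) : List String → Int → List String → List String
  | [], _, out => out
  | l :: rest, chars, out =>
      if chars + PySem.Str.len l + 1 > maxc then out
      else tcLoopA maxc rest (chars + PySem.Str.len l + 1) (out ++ [l])

def truncate_code (code : String) (max_chars : Int) : String :=
  if code == "" then ""
  else if PySem.Str.len code ≤ max_chars then code
  else
    let lines := PySem.Str.splitlines code
    let out := tcLoopA max_chars lines 0 []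
    PySem.Str.join "\n" (out ++ ["/* TRUNCATED */"])

-- ===== PORT B =====
-- cumulative costs of the lines (Source B's cum list built from running total)
def tcCum : List String → Int → List Int
  | [], _ => []
  | l :: rest, total =>
      let total' := total + PySem.Str.len l + 1
      total' :: tcCum rest total'

def truncate_code_alt (code : String) (max_chars : Int) : String :=
  if code == "" then ""
  else if PySem.Str.len code ≤ max_chars then code
  else
    let lines := PySem.Str.splitlines code
    let cum := tcCum lines 0
    let k := cum.countP (fun c => decide (c ≤ max_chars))
    PySem.Str.join "\n" (lines.take k ++ ["/* TRUNCATED */"])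

-- ===== PRECONDITION & SPEC =====
def Spec_truncate_code (code : String) (max_chars : Int) (out : String) : Prop := out = truncate_code_alt code max_chars
instance (code : String) (max_chars : Int) (out : String) : Decidable (Spec_truncate_code code max_chars out) := by unfold Spec_truncate_code; infer_instance

-- ===== CLAIM (what is proved, stated in full; the proofs are below) =====
def Claim_equal_truncate_code : Prop := ∀ (code : String) (max_chars : Int), Dom_truncate_code code max_chars → Spec_truncate_code code max_chars (truncate_code code max_chars)

-- ===== LEMMAS AND PROOFS =====
lemma strLen_nonneg (s : String) : 0 ≤ PySem.Str.len s := by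
  simp [PySem.Str.len_eq]

lemma tcCum_lb (lines : List String) (t : Int) :
    ∀ x ∈ tcCum lines t, t + 1 ≤ x := by
  induction lines generalizing t with
  | nil => simp [tcCum]
  | cons l rest ih =>
    intro x hx
    simp only [tcCum, List.mem_cons] at hx
    have hl := strLen_nonneg l
    rcases hx with rfl | hx
    · omega
    · have := ih _ x hx
      omega

lemma tcLoopA_eq_take (maxc : Int) (lines : List String) :
    ∀ (chars : Int) (out : List String),
      tcLoopA maxc lines chars out
        = out ++ lines.take ((tcCum lines chars).countP (fun c => decide (c ≤ maxc))) := by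
  induction lines with
  | nil => simp [tcLoopA, tcCum]
  | cons l rest ih =>
    intro chars out
    by_cases h : chars + PySem.Str.len l + 1 > maxc
    · have hz : (tcCum (l :: rest) chars).countP (fun c => decide (c ≤ maxc)) = 0 := by
        rw [List.countP_eq_zero]
        intro x hx
        simp only [tcCum, List.mem_cons] at hx
        have : chars + PySem.Str.len l + 1 ≤ x := by
          rcases hx with rfl | hx
          · omega
          · have := tcCum_lb rest _ x hx; omega
        simp; omega
      simp only [tcLoopA]
      rw [if_pos h, hz]
      simp
    · have hle : (chars + PySem.Str.len l + 1 ≤ maxc) := by omega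
      simp only [tcLoopA, if_neg h, ih, tcCum, List.countP_cons, decide_eq_true_eq,
        if_pos hle]
      simp [List.take_succ_cons]

-- ===== VERDICT (by name: the statement is the Claim_ definition above) =====
theorem truncate_code_spec : Claim_equal_truncate_code := by
  intro code max_chars _
  unfold Spec_truncate_code truncate_code truncate_code_alt
  simp only [tcLoopA_eq_take, List.nil_append]
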